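-- pv_equiv track=rewrite | github.com/skanamar017/StringsAndThings | python/strings_and_things.py | count_triple
-- ===== SOURCE A (Python) =====
-- def count_triple(input_str):
--     """
--     We'll say that a "triple" in a string is a char appearing three times in a row.
--     Return the number of triples in the given string. The triples may overlap.
--     example :  count_triple("abcXXXabc") // Should return 1
--                count_triple("xxxabyyyycd") // Should return 3
--                count_triple("a") // Should return 0
--     """
--     if len(input_str)<3:
--         return 0
--     count=0
--     for i in range(len(input_str)-2):
--         if len(set(input_str[i:i+3]))==1:
--             count+=1
--     return count
-- ===== SOURCE B (Python) =====
-- def count_triple(input_str):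
--     # Run-length scan: a maximal run of L equal chars contributes max(0, L-2) triples.
--     total = 0
--     run = 0
--     prev = None
--     for c in input_str:
--         if c == prev:
--             run += 1
--         else:
--             total += max(0, run - 2)
--             run = 1
--             prev = c
--     total += max(0, run - 2)
--     return total
-- ===== Notes on version B (the rewrite author's own statement) =====
-- stated objective: simpler
-- what changed: Replaced the per-index window test (building a set of each 3-char slice and checking its size) with a single run-length scan that adds max(0, L-2) for each maximal run of L equal characters.
import Mathlib
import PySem

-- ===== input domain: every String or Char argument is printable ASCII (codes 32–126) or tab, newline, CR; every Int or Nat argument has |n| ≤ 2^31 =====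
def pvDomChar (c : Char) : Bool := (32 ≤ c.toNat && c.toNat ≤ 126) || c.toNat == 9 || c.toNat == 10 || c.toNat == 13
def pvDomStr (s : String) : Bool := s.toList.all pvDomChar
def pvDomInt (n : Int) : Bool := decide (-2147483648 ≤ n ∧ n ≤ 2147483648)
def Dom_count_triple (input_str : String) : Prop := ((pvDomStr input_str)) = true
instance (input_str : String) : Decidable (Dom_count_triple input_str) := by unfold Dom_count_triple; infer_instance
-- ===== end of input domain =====

-- B replaces A's per-window set-size test with a single run-length scan adding max(0, L-2) per maximal run (objective: simpler one-pass alternative).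

-- ===== PORT A =====
-- A: if len < 3 return 0; loop i in range(len-2), count windows whose 3-char slice has a 1-element set.
def count_triple (input_str : String) : Int :=
  let l := input_str.toList
  if l.length < 3 then 0
  else
    (PySem.List.pyRange 0 ((l.length : Int) - 2) 1).foldl
      (fun count i =>
        if (PySem.Set.ofList (PySem.List.slice l (some i) (some (i + 3)))).length == 1
        then count + 1 else count) 0

-- ===== PORT B =====
-- B: fold over the characters with state (total, run, prev), flushing max(0, run-2) on each run change and at the end.
def ctStep (st : Int × Int × Option Char) (c : Char) : Int × Int × Option Char :=
  if st.2.2 == some c then (st.1, st.2.1 + 1, st.2.2)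
  else (st.1 + max 0 (st.2.1 - 2), 1, some c)

def count_triple_alt (input_str : String) : Int :=
  let st := input_str.toList.foldl ctStep (0, 0, none)
  st.1 + max 0 (st.2.1 - 2)

-- ===== PRECONDITION & SPEC =====
def Spec_count_triple (input_str : String) (out : Int) : Prop := out = count_triple_alt input_str
instance (input_str : String) (out : Int) : Decidable (Spec_count_triple input_str out) := by unfold Spec_count_triple; infer_instance

-- ===== CLAIM (what is proved, stated in full; the proofs are below) =====
def Claim_equal_count_triple : Prop := ∀ (input_str : String), Dom_count_triple input_str → Spec_count_triple input_str (count_triple input_str)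

-- ===== LEMMAS AND PROOFS =====

/-- Number of positions where three equal chars start, front recursion. -/
def winCount : List Char → Int
  | a :: b :: c :: t => (if a = b ∧ b = c then 1 else 0) + winCount (b :: c :: t)
  | _ => 0

/-- Triples contributed by a pending run of `r` copies of `p` followed by `l`. -/
def ctr : Char → Int → List Char → Int
  | _, r, [] => max 0 (r - 2)
  | p, r, c :: l => if c = p then ctr p (r + 1) l else max 0 (r - 2) + ctr c 1 l

theorem foldl_ctStep (l : List Char) (t r : Int) (p : Char) :
    (l.foldl ctStep (t, r, some p)).1 + max 0 ((l.foldl ctStep (t, r, some p)).2.1 - 2)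
      = t + ctr p r l := by
  induction l generalizing t r p with
  | nil => simp [ctr]
  | cons c l ih =>
    by_cases h : c = p
    · simp [ctStep, ctr, h, ih]
    · have h' : ¬ (p = c) := fun hh => h hh.symm
      simp [ctStep, ctr, h, h', ih, add_assoc]

theorem winCount_replicate (r : Nat) (p : Char) :
    winCount (List.replicate r p) = max 0 ((r : Int) - 2) := by
  induction r with
  | zero => simp [winCount]
  | succ r ih =>
    match r, ih with
    | 0, _ => simp [winCount]
    | 1, _ => simp [winCount, List.replicate]
    | (s + 2), ih =>
      have : List.replicate (s + 2 + 1) p = p :: p :: p :: List.replicate s p := by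
        simp [List.replicate_succ]
      rw [this]
      have h2 : List.replicate (s + 2) p = p :: p :: List.replicate s p := by
        simp [List.replicate_succ]
      rw [winCount, ← h2, ih]
      simp only [and_self, if_true]
      push_cast
      omega

theorem winCount_replicate_append (r : Nat) (p c : Char) (l : List Char) (h : p ≠ c) :
    winCount (List.replicate r p ++ c :: l) = max 0 ((r : Int) - 2) + winCount (c :: l) := by
  induction r with
  | zero => simp
  | succ r ih =>
    match r, ih with
    | 0, _ =>
      cases l with
      | nil => simp [winCount]
      | cons d t => simp [winCount, h]
    | 1, _ =>
      cases l with
      | nil => simp [winCount, List.replicate, h]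
      | cons d t => simp [winCount, h, List.replicate]
    | (s + 2), ih =>
      have e : List.replicate (s + 2 + 1) p ++ c :: l
          = p :: p :: p :: (List.replicate s p ++ c :: l) := by
        simp [List.replicate_succ]
      have e2 : List.replicate (s + 2) p ++ c :: l
          = p :: p :: (List.replicate s p ++ c :: l) := by
        simp [List.replicate_succ]
      rw [e, winCount, ← e2, ih]
      simp only [and_self, if_true]
      push_cast
      omega

theorem ctr_eq_winCount (l : List Char) (p : Char) (r : Nat) (hr : 1 ≤ r) :
    ctr p (r : Int) l = winCount (List.replicate r p ++ l) := by
  induction l generalizing p r with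
  | nil => simp [ctr, winCount_replicate]
  | cons c t ih =>
    by_cases h : c = p
    · subst h
      have : List.replicate r c ++ c :: t = List.replicate (r + 1) c ++ t := by
        simp [List.replicate_succ']
      rw [ctr, if_pos rfl, this, ← ih c (r + 1) (by omega)]
      push_cast; ring_nf
    · have h' : p ≠ c := fun hh => h hh.symm
      rw [ctr, if_neg h, winCount_replicate_append r p c t h',
        show (1 : Int) = ((1 : Nat) : Int) from rfl, ih c 1 le_rfl]
      simp

/-- The window indicator A tests, as a Bool predicate on the index. -/
def indA (l : List Char) (i : Int) : Bool :=
  (PySem.Set.ofList (PySem.List.slice l (some i) (some (i + 3)))).length == 1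

theorem setLen3 (a b c : Char) :
    ((PySem.Set.ofList [a, b, c]).length == 1) = decide (a = b ∧ b = c) := by
  have h1 : PySem.Set.ofList [a, b, c] = PySem.Set.add (PySem.Set.add (PySem.Set.add [] a) b) c := rfl
  have h2 : PySem.Set.add ([] : PySem.Set Char) a = [a] := by
    rw [PySem.Set.add]; simp
  rw [h1, h2]
  by_cases hab : a = b
  · subst hab
    have h3 : PySem.Set.add [a] a = [a] := by rw [PySem.Set.add]; simp
    rw [h3]
    by_cases hac : a = c
    · subst hac
      rw [h3]; simp
    · have : PySem.Set.add [a] c = [a, c] := by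
        rw [PySem.Set.add]; simp [List.contains_eq_mem, Ne.symm hac]
      rw [this]; simp [hac]
  · have h3 : PySem.Set.add [a] b = [a, b] := by
      rw [PySem.Set.add]; simp [List.contains_eq_mem, Ne.symm hab]
    rw [h3]
    by_cases hc : c ∈ ([a, b] : List Char)
    · have : PySem.Set.add [a, b] c = [a, b] := by
        rw [PySem.Set.add]; simp [List.contains_eq_mem] at hc ⊢; tauto
      rw [this]; simp [hab]
    · have : PySem.Set.add [a, b] c = [a, b, c] := by
        rw [PySem.Set.add]; simp [List.contains_eq_mem] at hc ⊢; tauto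
      rw [this]; simp [hab]

theorem indA_shift (a : Char) (l : List Char) (i : Nat) :
    indA (a :: l) ((i : Int) + 1) = indA l (i : Int) := by
  unfold indA
  have e1 : ((i : Int) + 1) = ((i + 1 : Nat) : Int) := by push_cast; ring
  have e2 : ((i : Int) + 3) = ((i + 3 : Nat) : Int) := by push_cast; ring
  have e3 : ((i + 1 : Nat) : Int) + 3 = ((i + 4 : Nat) : Int) := by push_cast; ring
  rw [e1, e3, e2, PySem.List.slice_natCast, PySem.List.slice_natCast]
  simp

theorem countP_indA (l : List Char) :
    (List.countP (fun i : Nat => indA l (i : Int)) (List.range (l.length - 2)) : Int)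
      = winCount l := by
  induction l with
  | nil => simp [winCount]
  | cons a t ih =>
    match t, ih with
    | [], _ => simp [winCount]
    | [b], _ => simp [winCount]
    | (b :: c :: t), ih =>
      have hlen : (a :: b :: c :: t).length - 2 = (b :: c :: t).length - 2 + 1 := by
        simp
      rw [hlen, List.range_succ_eq_map, List.countP_cons, List.countP_map]
      have h0 : indA (a :: b :: c :: t) ((0 : Nat) : Int) = decide (a = b ∧ b = c) := by
        unfold indA
        rw [show ((0 : Nat) : Int) + 3 = ((3 : Nat) : Int) by norm_num,
          PySem.List.slice_natCast]
        simpa using setLen3 a b c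
      have : List.countP ((fun i : Nat => indA (a :: b :: c :: t) (i : Int)) ∘ Nat.succ)
            (List.range ((b :: c :: t).length - 2))
          = List.countP (fun i : Nat => indA (b :: c :: t) (i : Int))
            (List.range ((b :: c :: t).length - 2)) := by
        apply List.countP_congr
        intro i _
        simpa [Function.comp, Nat.succ_eq_add_one] using indA_shift a (b :: c :: t) i
      rw [this]
      simp only [winCount, ← ih]
      push_cast
      rw [show ((0 : Nat) : Int) = (0 : Int) from rfl] at h0
      rw [h0]
      by_cases hab : a = b ∧ b = c <;> simp [hab] <;> omega


theorem countA (l : List Char) (h : ¬ l.length < 3) :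
    (PySem.List.pyRange 0 ((l.length : Int) - 2) 1).foldl
      (fun count i => if indA l i then count + 1 else count) 0 = winCount l := by
  have e : ((l.length : Int) - 2) = ((l.length - 2 : Nat) : Int) := by
    push_cast [Nat.cast_sub (by omega : 2 ≤ l.length)]; ring
  rw [e, PySem.List.pyRange_zero_natCast, List.foldl_map, PySem.List.foldl_if_add_one]
  simpa using countP_indA l

theorem countB (s : String) : count_triple_alt s = winCount s.toList := by
  unfold count_triple_alt
  cases hs : s.toList with
  | nil => simp [winCount]
  | cons c t =>
    have h1 : ctStep (0, 0, none) c = (0, 1, some c) := by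
      simp [ctStep]
    rw [List.foldl_cons, h1, foldl_ctStep,
      show (1 : Int) = ((1 : Nat) : Int) from rfl, ctr_eq_winCount t c 1 le_rfl]
    simp

-- ===== VERDICT (by name: the statement is the Claim_ definition above) =====
theorem count_triple_spec : Claim_equal_count_triple := by
  intro s _
  unfold Spec_count_triple count_triple
  rw [countB]
  by_cases h : s.toList.length < 3
  · simp only [h, if_true]
    cases hs : s.toList with
    | nil => simp [winCount]
    | cons a t =>
      rw [hs] at h
      match t, h with
      | [], _ => simp [winCount]
      | [b], _ => simp [winCount]
      | (b :: c :: t), h => simp at h; omega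
  · simp only [h, if_false]
    exact countA s.toList h
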